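-- pv_equiv track=rewrite | github.com/CaiWu2004/Python | Notes/Week06/LabQ./Lab6Q2.py | decode_entire_msg
-- ===== SOURCE A (Python) =====
-- def decode_part(msg, start, end, step):
--     return msg[start: end: step]
--
-- def decode_entire_msg(msg):
--     msg += "1"
--     letter_count = 0
--     step = int(msg[0])
--     start = 1
--     ind = 1
--     output_msg = ""
--
--     while letter_count < 100 and ind < len(msg):
--         if msg[ind].isdigit():
--             end = ind
--             output_msg += decode_part(msg, start, end, step)
--
--             step = int(msg[ind])
--             start = ind + 1
--
--         if msg[ind].isalpha():
--             letter_count += 1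
--         ind += 1
--
--     return output_msg
-- ===== SOURCE B (Python) =====
-- def decode_entire_msg(msg):
--     s = msg + "1"
--     step = int(s[0])
--     markers = [i + 1 for i, ch in enumerate(s[1:]) if ch.isdigit()]
--     pieces = []
--     letters = 0
--     prev = 0
--     for e in markers:
--         letters += sum(1 for ch in s[prev + 1:e] if ch.isalpha())
--         if letters >= 100:
--             break
--         pieces.append(s[prev + 1:e:step])
--         step = int(s[e])
--         prev = e
--     return "".join(pieces)
-- ===== Notes on version B (the rewrite author's own statement) =====
-- stated objective: alternative
-- what changed: B replaces A's single character-by-character while-loop (mutating step/start/letter_count per character) by a two-phase decomposition: first collect all digit-marker positions of the sentinel-extended message, then slice segment by segment between consecutive markers, counting letters per whole segment and joining the pieces at the end.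
import Mathlib
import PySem

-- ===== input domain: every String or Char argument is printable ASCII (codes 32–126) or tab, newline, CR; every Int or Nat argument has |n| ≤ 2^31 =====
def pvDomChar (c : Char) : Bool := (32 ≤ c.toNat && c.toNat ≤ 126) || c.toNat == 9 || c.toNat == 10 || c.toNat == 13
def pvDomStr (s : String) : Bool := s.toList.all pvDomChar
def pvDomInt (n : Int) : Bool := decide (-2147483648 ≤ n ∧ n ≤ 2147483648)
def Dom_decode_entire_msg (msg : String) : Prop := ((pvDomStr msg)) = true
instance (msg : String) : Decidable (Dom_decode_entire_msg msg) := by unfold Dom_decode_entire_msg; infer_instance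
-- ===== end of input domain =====

-- B decodes in two phases (collect digit-marker positions, then slice segment by segment)
-- instead of A's single character-by-character while loop; objective: alternative decomposition, same cost.

-- ===== PORT A =====
-- int(c) for a single character c; total stand-in (the guard `isdigit` holds wherever A evaluates it inside Pre_)
def pvDigitVal (c : Char) : Int := (PySem.Int.ofChars? [c]).getD 0

-- the while-loop of A: state (letter_count, step, start, ind, output_msg)
def pvALoop (s : List Char) (lc : Nat) (step : Int) (start ind : Nat) (out : List Char) : List Char :=
  if lc < 100 then
    if h : ind < s.length then
      if PySem.Chars.isdigit s[ind] then
        pvALoop s (if PySem.Chars.isalpha s[ind] then lc + 1 else lc) (pvDigitVal s[ind]) (ind + 1) (ind + 1)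
          (out ++ (PySem.List.slice? s (some (start : Int)) (some (ind : Int)) step).getD [])
      else
        pvALoop s (if PySem.Chars.isalpha s[ind] then lc + 1 else lc) step start (ind + 1) out
    else out
  else out
termination_by s.length - ind
decreasing_by all_goals omega

def decode_entire_msg (msg : String) : String :=
  let s := msg.toList ++ ['1']
  String.ofList (pvALoop s 0 (pvDigitVal (PySem.List.pyGetD s 0 ' ')) 1 1 [])

-- ===== PORT B =====
-- markers = [i + 1 for i, ch in enumerate(s[1:]) if ch.isdigit()]
def pvMarkers (s : List Char) : List Int :=
  ((PySem.List.enumerate (PySem.List.slice s (some 1) none)).filter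
    (fun p => PySem.Chars.isdigit p.2)).map (fun p => p.1 + 1)

-- the for-loop of B over the marker list: state (letters, step, prev, pieces)
def pvBLoop (s : List Char) (ms : List Int) (letters : Nat) (step prev : Int)
    (pieces : List (List Char)) : List (List Char) :=
  match ms with
  | [] => pieces
  | e :: rest =>
      let letters' := letters +
        (PySem.List.slice s (some (prev + 1)) (some e)).countP (fun ch => PySem.Chars.isalpha ch)
      if 100 ≤ letters' then pieces
      else pvBLoop s rest letters' (pvDigitVal (PySem.List.pyGetD s e ' ')) e
             (pieces ++ [(PySem.List.slice? s (some (prev + 1)) (some e) step).getD []])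

def decode_entire_msg_alt (msg : String) : String :=
  let s := msg.toList ++ ['1']
  String.ofList (pvBLoop s (pvMarkers s) 0 (pvDigitVal (PySem.List.pyGetD s 0 ' ')) 0 []).flatten

-- ===== PRECONDITION & SPEC =====
-- Pre_ excludes exactly the inputs where Python A raises: a non-digit first character
-- (int(msg[0]) is a ValueError), and inputs where some flushed slice uses step 0
-- (a slice with step 0 is a ValueError): a zero-digit marker whose next digit j is still reached,
-- i.e. fewer than 100 letters occur before position j.
def Pre_decode_entire_msg (msg : String) : Prop :=
  let s := msg.toList ++ ['1']
  PySem.Chars.isdigit (PySem.List.pyGetD s 0 ' ') = true ∧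
  ∀ j ∈ List.range s.length, ∀ i ∈ List.range j,
    s[i]! = '0' → PySem.Chars.isdigit s[j]! = true →
    (∀ k ∈ List.range j, i < k → PySem.Chars.isdigit s[k]! = false) →
    100 ≤ ((s.take j).drop 1).countP (fun c => PySem.Chars.isalpha c)
instance (msg : String) : Decidable (Pre_decode_entire_msg msg) := by
  unfold Pre_decode_entire_msg; infer_instance

def pvWitness_decode_entire_msg : String := "2abc"

def Spec_decode_entire_msg (msg : String) (out : String) : Prop := out = decode_entire_msg_alt msg
instance (msg : String) (out : String) : Decidable (Spec_decode_entire_msg msg out) := by unfold Spec_decode_entire_msg; infer_instance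

-- ===== CLAIM (what is proved, stated in full; the proofs are below) =====
def Claim_equal_decode_entire_msg : Prop := ∀ (msg : String), Dom_decode_entire_msg msg → Pre_decode_entire_msg msg → Spec_decode_entire_msg msg (decode_entire_msg msg)

-- ===== LEMMAS AND PROOFS =====

-- letter count of positions [a, b) of s
def pvCnt (s : List Char) (a b : Nat) : Nat :=
  ((s.drop a).take (b - a)).countP (fun c => PySem.Chars.isalpha c)

lemma pv_digit_not_alpha (c : Char) (h : PySem.Chars.isdigit c = true) :
    PySem.Chars.isalpha c = false := by
  simp [PySem.Chars.isdigit, PySem.Chars.isalpha, PySem.Chars.isupper, PySem.Chars.islower] at *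
  constructor <;> intro h1 <;> exact absurd (h1.trans h.2) (by decide)

lemma pvCnt_self (s : List Char) (a : Nat) : pvCnt s a a = 0 := by
  simp [pvCnt]

lemma pvCnt_cons (s : List Char) (a b : Nat) (hab : a < b) (hb : b ≤ s.length) :
    pvCnt s a b = (if PySem.Chars.isalpha s[a]! then 1 else 0) + pvCnt s (a + 1) b := by
  have ha : a < s.length := lt_of_lt_of_le hab hb
  have h1 : s.drop a = s[a] :: s.drop (a + 1) := List.drop_eq_getElem_cons ha
  have h2 : b - a = (b - (a + 1)) + 1 := by omega
  rw [pvCnt, pvCnt, h1, h2, List.take_succ_cons, List.countP_cons, getElem!_pos s a ha]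
  by_cases h : PySem.Chars.isalpha s[a] <;> simp [h] <;> omega

lemma pvALoop_100 (s : List Char) (lc : Nat) (hlc : ¬ lc < 100) (step : Int) (start ind : Nat)
    (out : List Char) : pvALoop s lc step start ind out = out := by
  rw [pvALoop]; simp [hlc]

lemma pvALoop_end (s : List Char) (lc : Nat) (step : Int) (start : Nat) (out : List Char) :
    pvALoop s lc step start s.length out = out := by
  rw [pvALoop]; simp

lemma pvALoop_skip (s : List Char) (e : Nat) (he : e ≤ s.length) :
    ∀ (n ind : Nat), ind + n = e →
    (∀ k, ind ≤ k → k < e → PySem.Chars.isdigit s[k]! = false) →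
    ∀ (lc : Nat) (step : Int) (start : Nat) (out : List Char),
    pvALoop s lc step start ind out =
      if lc + pvCnt s ind e < 100 then pvALoop s (lc + pvCnt s ind e) step start e out else out := by
  intro n
  induction n with
  | zero =>
    intro ind hind _ lc step start out
    have : ind = e := by omega
    subst this
    rw [pvCnt_self]
    by_cases hlc : lc < 100
    · simp [hlc]
    · rw [if_neg (by omega), pvALoop_100 s lc hlc]
  | succ n ih =>
    intro ind hind hnd lc step start out
    have hlt : ind < e := by omega
    have hil : ind < s.length := by omega
    by_cases hlc : lc < 100
    · have hd : PySem.Chars.isdigit s[ind] = false := by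
        have := hnd ind le_rfl hlt; rwa [getElem!_pos s ind hil] at this
      rw [pvALoop]
      rw [if_pos hlc, dif_pos hil, if_neg (by simp [hd])]
      rw [ih (ind + 1) (by omega) (fun k hk1 hk2 => hnd k (by omega) hk2) _ step start out]
      rw [pvCnt_cons s ind e hlt he, getElem!_pos s ind hil]
      by_cases ha : PySem.Chars.isalpha s[ind] <;>
        simp [ha, Nat.add_comm, Nat.add_left_comm]
    · rw [pvALoop_100 s lc hlc, if_neg (by omega)]

lemma pvALoop_digit (s : List Char) (e : Nat) (he : e < s.length)
    (hd : PySem.Chars.isdigit s[e]! = true) (lc : Nat) (hlc : lc < 100) (step : Int)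
    (start : Nat) (out : List Char) :
    pvALoop s lc step start e out =
      pvALoop s lc (pvDigitVal s[e]!) (e + 1) (e + 1)
        (out ++ (PySem.List.slice? s (some (start : Int)) (some (e : Int)) step).getD []) := by
  rw [getElem!_pos s e he] at hd ⊢
  rw [pvALoop, if_pos hlc, dif_pos he, if_pos hd, pv_digit_not_alpha _ hd]
  simp

lemma pvBLoop_acc (s : List Char) :
    ∀ (ms : List Int) (lc : Nat) (step prev : Int) (pieces : List (List Char)),
    pvBLoop s ms lc step prev pieces = pieces ++ pvBLoop s ms lc step prev [] := by
  intro ms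
  induction ms with
  | nil => intro lc step prev pieces; simp [pvBLoop]
  | cons e rest ih =>
    intro lc step prev pieces
    rw [pvBLoop, pvBLoop]
    split
    · simp
    · conv_lhs => rw [ih]
      conv_rhs => rw [ih]
      simp

lemma pvSliceCast (s : List Char) (p e : Nat) :
    PySem.List.slice s (some ((p : Int) + 1)) (some ((e : Nat) : Int)) =
      (s.drop (p + 1)).take (e - (p + 1)) := by
  have h : ((p : Int) + 1) = (((p + 1 : Nat) : Nat) : Int) := by push_cast; ring
  rw [h, PySem.List.slice_natCast]

lemma pvMain (s : List Char) :
    ∀ (ms : List Nat) (p : Nat), p < s.length →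
    List.Pairwise (· < ·) (p :: ms) →
    (∀ m ∈ ms, m < s.length ∧ PySem.Chars.isdigit s[m]! = true) →
    (∀ k, p < k → k < s.length → PySem.Chars.isdigit s[k]! = true → k ∈ ms) →
    ∀ (lc : Nat) (step : Int) (out : List Char),
    pvALoop s lc step (p + 1) (p + 1) out =
      out ++ (pvBLoop s (ms.map (fun (n : Nat) => (n : Int))) lc step (p : Int) []).flatten := by
  intro ms
  induction ms with
  | nil =>
    intro p hp _ _ hcomp lc step out
    have hnd : ∀ k, p + 1 ≤ k → k < s.length → PySem.Chars.isdigit s[k]! = false := by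
      intro k hk1 hk2
      by_contra h
      exact absurd (hcomp k (by omega) hk2 (by simpa using h)) (by simp)
    rw [pvALoop_skip s s.length le_rfl (s.length - (p + 1)) (p + 1) (by omega) hnd lc step
        (p + 1) out]
    simp only [List.map_nil, pvBLoop, List.flatten_nil, List.append_nil]
    split
    · exact pvALoop_end s _ step (p + 1) out
    · rfl
  | cons e rest ih =>
    intro p hp hpair hmem hcomp lc step out
    obtain ⟨hplt, hpair'⟩ := List.pairwise_cons.mp hpair
    have hpe : p < e := hplt e (List.mem_cons_self)
    obtain ⟨helen, hde⟩ := hmem e (List.mem_cons_self)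
    have herest : ∀ m ∈ rest, e < m := (List.pairwise_cons.mp hpair').1
    have hnd : ∀ k, p + 1 ≤ k → k < e → PySem.Chars.isdigit s[k]! = false := by
      intro k hk1 hk2
      by_contra h
      have hkmem := hcomp k (by omega) (by omega) (by simpa using h)
      rcases List.mem_cons.mp hkmem with h1 | h1
      · omega
      · exact absurd (herest k h1) (by omega)
    rw [pvALoop_skip s e (le_of_lt helen) (e - (p + 1)) (p + 1) (by omega) hnd lc step
        (p + 1) out]
    have hcnt : (PySem.List.slice s (some ((p : Int) + 1))
        (some ((e : Nat) : Int))).countP (fun ch => PySem.Chars.isalpha ch) = pvCnt s (p + 1) e := by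
      rw [pvSliceCast]; rfl
    rw [List.map_cons, pvBLoop]
    simp only [hcnt]
    by_cases h100 : lc + pvCnt s (p + 1) e < 100
    · rw [if_pos h100, if_neg (by omega)]
      rw [pvALoop_digit s e helen hde _ h100 step (p + 1) out]
      have hget : PySem.List.pyGetD s ((e : Nat) : Int) ' ' = s[e]! := by
        rw [PySem.List.pyGetD_natCast, getElem!_pos s e helen, List.getD_eq_getElem s ' ' helen]
      have hrest_mem : ∀ m ∈ rest, m < s.length ∧ PySem.Chars.isdigit s[m]! = true :=
        fun m hm => hmem m (List.mem_cons_of_mem _ hm)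
      have hrest_comp : ∀ k, e < k → k < s.length → PySem.Chars.isdigit s[k]! = true → k ∈ rest := by
        intro k hk1 hk2 hk3
        rcases List.mem_cons.mp (hcomp k (by omega) hk2 hk3) with h1 | h1
        · omega
        · exact h1
      rw [ih e helen hpair' hrest_mem hrest_comp _ (pvDigitVal s[e]!) _]
      rw [hget]
      conv_rhs => rw [pvBLoop_acc]
      rw [show (((p + 1 : Nat) : Int)) = (p : Int) + 1 from by push_cast; ring]
      simp
    · rw [if_neg h100, if_pos (by omega)]
      simp


lemma pvEnumFM (q : Char → Bool) :
    ∀ (t : List Char) (a : Int),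
    ((PySem.List.enumerate t a).filter (fun p => q p.2)).map (fun p => p.1 + 1) =
      ((List.range t.length).filter (fun k => q t[k]!)).map (fun k : Nat => a + (k : Int) + 1) := by
  intro t
  induction t with
  | nil => intro a; simp [PySem.List.enumerate_nil]
  | cons x t ih =>
    intro a
    rw [PySem.List.enumerate_cons]
    have hcomp : ((fun k : Nat => q (x :: t)[k]!) ∘ Nat.succ) = fun k : Nat => q t[k]! := by
      funext k; simp
    have hmap : List.map ((fun k : Nat => a + (k : Int) + 1) ∘ Nat.succ)
        ((List.range t.length).filter (fun k => q t[k]!)) =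
        List.map (fun k : Nat => (a + 1) + (k : Int) + 1)
        ((List.range t.length).filter (fun k => q t[k]!)) := by
      apply List.map_congr_left; intro k _; simp; ring
    simp only [List.length_cons, List.range_succ_eq_map, List.filter_cons, List.getElem!_cons_zero,
      List.filter_map, hcomp]
    by_cases h : q x
    · simp only [h, if_pos, List.map_cons, List.map_map]
      rw [hmap, ih (a + 1)]
      norm_num
    · simp only [h, Bool.false_eq_true, if_false, List.map_map]
      rw [hmap, ih (a + 1)]

lemma pvMarkers_spec (c : Char) (t : List Char) :
    ∃ ms : List Nat,
      pvMarkers (c :: t) = ms.map (fun (n : Nat) => (n : Int)) ∧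
      List.Pairwise (· < ·) ((0 : Nat) :: ms) ∧
      (∀ m ∈ ms, m < (c :: t).length ∧ PySem.Chars.isdigit (c :: t)[m]! = true) ∧
      (∀ k, 0 < k → k < (c :: t).length → PySem.Chars.isdigit (c :: t)[k]! = true → k ∈ ms) := by
  refine ⟨((List.range t.length).filter
      (fun k => PySem.Chars.isdigit t[k]!)).map (fun k => k + 1), ?_, ?_, ?_, ?_⟩
  · rw [pvMarkers, PySem.List.slice_from_one, List.tail_cons,
      pvEnumFM (fun ch => PySem.Chars.isdigit ch) t 0, List.map_map]
    apply List.map_congr_left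
    intro k _
    simp
  · rw [List.pairwise_cons]
    constructor
    · intro m hm
      simp only [List.mem_map] at hm
      omega
    · refine List.Pairwise.map _ (fun a b h => by omega) ?_
      exact ((List.pairwise_lt_range).filter _).imp (fun h => by omega)
  · intro m hm
    simp only [List.mem_map, List.mem_filter, List.mem_range] at hm
    obtain ⟨k, ⟨hk, hdk⟩, rfl⟩ := hm
    exact ⟨by simpa using hk, by simpa using hdk⟩
  · intro k h0 hlen hd
    simp only [List.mem_map, List.mem_filter, List.mem_range]
    refine ⟨k - 1, ⟨⟨by simp at hlen; omega, ?_⟩, by omega⟩⟩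
    have : k = (k - 1) + 1 := by omega
    rw [this] at hd
    simpa using hd


-- ===== VERDICT (by name: the statement is the Claim_ definition above) =====
theorem decode_entire_msg_spec : Claim_equal_decode_entire_msg := by
  intro msg _dom _pre
  unfold Spec_decode_entire_msg decode_entire_msg decode_entire_msg_alt
  simp only []
  cases hs : msg.toList ++ ['1'] with
  | nil => exact absurd hs (by simp)
  | cons c t =>
    obtain ⟨ms, hmk, hpair, hmem, hcomp⟩ := pvMarkers_spec c t
    rw [hmk]
    have h0 : (0 : Nat) < (c :: t).length := by simp
    have := pvMain (c :: t) ms 0 h0 hpair hmem hcomp 0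
      (pvDigitVal (PySem.List.pyGetD (c :: t) 0 ' ')) []
    exact congrArg String.ofList (by simpa using this)
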